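-- pv_equiv track=rewrite | github.com/lijanhque/pedagogistpte-v1-engine | steps/python/treatment_scheduler_step.py | generate_medication_instructions
-- ===== SOURCE A (Python) =====
-- def generate_medication_instructions(medication):
--     instructions = []
--     for med in medication:
--         if 'Pain Relief' in med:
--             instructions.append('Give 1 tablet every 8 hours with food')
--         elif 'Antibiotics' in med:
--             instructions.append('Give 1 tablet every 12 hours for 7 days')
--         elif 'Fever Reducer' in med:
--             instructions.append('Give 1 tablet every 6 hours as needed')
--         elif 'Anti-anxiety' in med:
--             instructions.append('Give 1 tablet every 12 hours during stressful periods')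
--         else:
--             instructions.append('Follow veterinarian instructions')
--     return instructions
-- ===== SOURCE B (Python) =====
-- def generate_medication_instructions(medication):
--     # Keyword-major multi-pass: start with all defaults, then sweep the whole list
--     # once per keyword in REVERSE priority order, overwriting matching slots, so the
--     # last (highest-priority) pass wins -- same result as A's first-match elif chain.
--     out = ['Follow veterinarian instructions'] * len(medication)
--     for kw, ins in [
--         ('Anti-anxiety', 'Give 1 tablet every 12 hours during stressful periods'),
--         ('Fever Reducer', 'Give 1 tablet every 6 hours as needed'),
--         ('Antibiotics', 'Give 1 tablet every 12 hours for 7 days'),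
--         ('Pain Relief', 'Give 1 tablet every 8 hours with food'),
--     ]:
--         for i, med in enumerate(medication):
--             if kw in med:
--                 out[i] = ins
--     return out
-- ===== Notes on version B (the rewrite author's own statement) =====
-- stated objective: alternative
-- what changed: Replaced the element-major elif chain with a keyword-major multi-pass algorithm: the output starts as all defaults and each keyword, taken in reverse priority order, sweeps the whole list overwriting matching positions, so the last (highest-priority) pass yields A's first-match result.
import Mathlib
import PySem

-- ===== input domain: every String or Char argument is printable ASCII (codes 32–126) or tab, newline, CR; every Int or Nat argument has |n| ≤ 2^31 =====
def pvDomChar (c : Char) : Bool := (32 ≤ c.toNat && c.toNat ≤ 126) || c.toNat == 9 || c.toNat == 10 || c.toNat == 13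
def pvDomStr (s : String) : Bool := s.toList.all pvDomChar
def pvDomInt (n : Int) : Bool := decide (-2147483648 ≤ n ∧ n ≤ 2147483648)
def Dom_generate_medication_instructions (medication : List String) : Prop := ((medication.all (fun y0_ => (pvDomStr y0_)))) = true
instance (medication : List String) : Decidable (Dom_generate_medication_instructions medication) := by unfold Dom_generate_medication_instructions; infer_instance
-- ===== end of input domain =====

-- B replaces A's element-major elif chain by a keyword-major multi-pass overwrite in
-- reverse priority order (alternative decomposition; same cost).

-- ===== PORT A =====
def generate_medication_instructions (medication : List String) : List String :=
  medication.foldl (fun instructions med =>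
    if PySem.Str.isIn "Pain Relief" med then
      instructions ++ ["Give 1 tablet every 8 hours with food"]
    else if PySem.Str.isIn "Antibiotics" med then
      instructions ++ ["Give 1 tablet every 12 hours for 7 days"]
    else if PySem.Str.isIn "Fever Reducer" med then
      instructions ++ ["Give 1 tablet every 6 hours as needed"]
    else if PySem.Str.isIn "Anti-anxiety" med then
      instructions ++ ["Give 1 tablet every 12 hours during stressful periods"]
    else
      instructions ++ ["Follow veterinarian instructions"]) []

-- ===== PORT B =====
-- the reverse-priority keyword table of Source B
def pvRevTable : List (String × String) :=
  [("Anti-anxiety", "Give 1 tablet every 12 hours during stressful periods"),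
   ("Fever Reducer", "Give 1 tablet every 6 hours as needed"),
   ("Antibiotics", "Give 1 tablet every 12 hours for 7 days"),
   ("Pain Relief", "Give 1 tablet every 8 hours with food")]

-- one sweep: Source B's inner "for i, med in enumerate(medication): if kw in med: out[i] = ins"
-- (out always has the same length as medication, so the indexed overwrite is this zip-map)
def pvSweep (kw ins : String) (medication out : List String) : List String :=
  (medication.zip out).map (fun p => if PySem.Str.isIn kw p.1 then ins else p.2)

def generate_medication_instructions_alt (medication : List String) : List String :=
  pvRevTable.foldl (fun out p => pvSweep p.1 p.2 medication out)
    (List.replicate medication.length "Follow veterinarian instructions")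

-- ===== PRECONDITION & SPEC =====
def Spec_generate_medication_instructions (medication : List String) (out : List String) : Prop := out = generate_medication_instructions_alt medication
instance (medication : List String) (out : List String) : Decidable (Spec_generate_medication_instructions medication out) := by unfold Spec_generate_medication_instructions; infer_instance

-- ===== CLAIM (what is proved, stated in full; the proofs are below) =====
def Claim_equal_generate_medication_instructions : Prop := ∀ (medication : List String), Dom_generate_medication_instructions medication → Spec_generate_medication_instructions medication (generate_medication_instructions medication)

-- ===== LEMMAS AND PROOFS =====

-- sweeping a map of the same list is a map of the per-element overwrite
theorem pvSweep_map (kw ins : String) (l : List String) (f : String → String) :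
    pvSweep kw ins l (l.map f)
      = l.map (fun m => if PySem.Str.isIn kw m then ins else f m) := by
  induction l with
  | nil => rfl
  | cons x xs ih => simp [pvSweep, List.zip] at ih ⊢; exact ih

-- ===== VERDICT (by name: the statement is the Claim_ definition above) =====
theorem generate_medication_instructions_spec : Claim_equal_generate_medication_instructions := by
  intro medication _
  unfold Spec_generate_medication_instructions
  -- B's value: unfold the four concrete sweeps via pvSweep_map
  have hB : generate_medication_instructions_alt medication
      = medication.map (fun med =>
          if PySem.Str.isIn "Pain Relief" med then "Give 1 tablet every 8 hours with food"
          else if PySem.Str.isIn "Antibiotics" med then "Give 1 tablet every 12 hours for 7 days"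
          else if PySem.Str.isIn "Fever Reducer" med then "Give 1 tablet every 6 hours as needed"
          else if PySem.Str.isIn "Anti-anxiety" med then "Give 1 tablet every 12 hours during stressful periods"
          else "Follow veterinarian instructions") := by
    unfold generate_medication_instructions_alt pvRevTable
    simp only [List.foldl_cons, List.foldl_nil]
    rw [show List.replicate medication.length "Follow veterinarian instructions"
          = medication.map (fun _ => "Follow veterinarian instructions") by
        simp [List.map_const']]
    rw [pvSweep_map, pvSweep_map, pvSweep_map, pvSweep_map]
  rw [hB]
  -- A's value: the foldl-append accumulates exactly that map
  unfold generate_medication_instructions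
  suffices h : ∀ (l acc : List String),
      l.foldl (fun instructions med =>
        if PySem.Str.isIn "Pain Relief" med then
          instructions ++ ["Give 1 tablet every 8 hours with food"]
        else if PySem.Str.isIn "Antibiotics" med then
          instructions ++ ["Give 1 tablet every 12 hours for 7 days"]
        else if PySem.Str.isIn "Fever Reducer" med then
          instructions ++ ["Give 1 tablet every 6 hours as needed"]
        else if PySem.Str.isIn "Anti-anxiety" med then
          instructions ++ ["Give 1 tablet every 12 hours during stressful periods"]
        else
          instructions ++ ["Follow veterinarian instructions"]) acc
        = acc ++ l.map (fun med =>
            if PySem.Str.isIn "Pain Relief" med then "Give 1 tablet every 8 hours with food"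
            else if PySem.Str.isIn "Antibiotics" med then "Give 1 tablet every 12 hours for 7 days"
            else if PySem.Str.isIn "Fever Reducer" med then "Give 1 tablet every 6 hours as needed"
            else if PySem.Str.isIn "Anti-anxiety" med then "Give 1 tablet every 12 hours during stressful periods"
            else "Follow veterinarian instructions") by
    simpa using h medication []
  intro l
  induction l with
  | nil => intro acc; simp
  | cons x xs ih =>
      intro acc
      simp only [List.foldl_cons, List.map_cons, ih]
      split_ifs <;> simp
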